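-- pv_equiv track=rewrite | github.com/fredporter/uDOS-dev | goblin/core/services/diagram_generator.py | _detect_diagram_type
-- ===== SOURCE A (Python) =====
-- def _detect_diagram_type(description: str) -> str:
--     """Detect appropriate diagram type from description
--
--     Args:
--         description: Text description
--
--     Returns:
--         Diagram type (flow, tree, grid, hierarchy)
--     """
--     desc_lower = description.lower()
--
--     # Flow indicators
--     if any(word in desc_lower for word in
--            ['process', 'workflow', 'steps', 'decision', 'if', 'then']):
--         return 'flow'
--
--     # Tree indicators
--     if any(word in desc_lower for word in
--            ['tree', 'hierarchy', 'parent', 'child', 'branch']):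
--         return 'tree'
--
--     # Grid/table indicators
--     if any(word in desc_lower for word in
--            ['table', 'grid', 'rows', 'columns', 'matrix']):
--         return 'grid'
--
--     # Hierarchy indicators
--     if any(word in desc_lower for word in
--            ['organization', 'org chart', 'levels', 'manager', 'team']):
--         return 'hierarchy'
--
--     # Default to flowchart
--     return 'flow'
-- ===== SOURCE B (Python) =====
-- # Single pass over a flat keyword->priority map, keeping a running minimum
-- # priority; no early return and no per-type staged scans.  The answer only
-- # depends on the smallest-priority keyword that occurs, so iteration order
-- # over the map is irrelevant.
-- _KEYWORD_PRIORITY = {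
--     'process': 0, 'workflow': 0, 'steps': 0, 'decision': 0, 'if': 0, 'then': 0,
--     'tree': 1, 'hierarchy': 1, 'parent': 1, 'child': 1, 'branch': 1,
--     'table': 2, 'grid': 2, 'rows': 2, 'columns': 2, 'matrix': 2,
--     'organization': 3, 'org chart': 3, 'levels': 3, 'manager': 3, 'team': 3,
-- }
-- _TYPES = ('flow', 'tree', 'grid', 'hierarchy')
--
--
-- def _detect_diagram_type(description: str) -> str:
--     desc = description.lower()
--     best = len(_TYPES)  # = 4: means "no keyword found yet"
--     for keyword, priority in _KEYWORD_PRIORITY.items():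
--         if priority < best and keyword in desc:
--             best = priority
--     return _TYPES[best] if best < len(_TYPES) else 'flow'
-- ===== Notes on version B (the rewrite author's own statement) =====
-- stated objective: alternative
-- what changed: Replaces the four staged if/any/return branches with a single pass over a flat keyword->priority dictionary that maintains a running minimum priority and finally maps that index to the type name (default 'flow'); correctness needs only that priorities encode A's branch order, not the iteration order.
import Mathlib
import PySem

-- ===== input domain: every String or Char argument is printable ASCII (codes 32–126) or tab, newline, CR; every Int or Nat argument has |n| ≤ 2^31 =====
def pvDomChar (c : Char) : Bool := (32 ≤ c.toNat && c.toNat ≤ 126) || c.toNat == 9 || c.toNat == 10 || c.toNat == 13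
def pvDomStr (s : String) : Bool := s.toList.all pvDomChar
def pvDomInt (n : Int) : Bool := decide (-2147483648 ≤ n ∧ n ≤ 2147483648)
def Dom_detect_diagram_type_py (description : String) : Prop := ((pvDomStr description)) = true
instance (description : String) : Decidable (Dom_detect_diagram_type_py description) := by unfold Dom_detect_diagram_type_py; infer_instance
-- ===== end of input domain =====

-- B replaces A's four staged if/any/return branches by one pass over a flat keyword→priority
-- map keeping a running minimum priority, then maps that index to the type name (alternative
-- decomposition, same cost).

-- ===== PORT A =====
def detect_diagram_type_py (description : String) : String :=
  let desc_lower := PySem.Str.lower description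
  if (["process", "workflow", "steps", "decision", "if", "then"]).any
      (fun word => PySem.Str.isIn word desc_lower) then "flow"
  else if (["tree", "hierarchy", "parent", "child", "branch"]).any
      (fun word => PySem.Str.isIn word desc_lower) then "tree"
  else if (["table", "grid", "rows", "columns", "matrix"]).any
      (fun word => PySem.Str.isIn word desc_lower) then "grid"
  else if (["organization", "org chart", "levels", "manager", "team"]).any
      (fun word => PySem.Str.isIn word desc_lower) then "hierarchy"
  else "flow"

-- ===== PORT B =====
-- the dict _KEYWORD_PRIORITY as an association list in insertion order
-- (priorities are small non-negative ints; ported as Nat)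
def pvKeywordPriority : List (String × Nat) :=
  [("process", 0), ("workflow", 0), ("steps", 0), ("decision", 0), ("if", 0), ("then", 0),
   ("tree", 1), ("hierarchy", 1), ("parent", 1), ("child", 1), ("branch", 1),
   ("table", 2), ("grid", 2), ("rows", 2), ("columns", 2), ("matrix", 2),
   ("organization", 3), ("org chart", 3), ("levels", 3), ("manager", 3), ("team", 3)]

def pvTypes : List String := ["flow", "tree", "grid", "hierarchy"]

def detect_diagram_type_py_alt (description : String) : String :=
  let desc := PySem.Str.lower description
  let best := pvKeywordPriority.foldl
    (fun best kp => if kp.2 < best ∧ PySem.Str.isIn kp.1 desc then kp.2 else best)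
    pvTypes.length
  if best < pvTypes.length then pvTypes.getD best "flow" else "flow"

-- ===== PRECONDITION & SPEC =====
def Spec_detect_diagram_type_py (description : String) (out : String) : Prop := out = detect_diagram_type_py_alt description
instance (description : String) (out : String) : Decidable (Spec_detect_diagram_type_py description out) := by unfold Spec_detect_diagram_type_py; infer_instance

-- ===== CLAIM (what is proved, stated in full; the proofs are below) =====
def Claim_equal_detect_diagram_type_py : Prop := ∀ (description : String), Dom_detect_diagram_type_py description → Spec_detect_diagram_type_py description (detect_diagram_type_py description)

-- ===== LEMMAS AND PROOFS =====

-- folding B's step over a block of keywords that all carry the same priority p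
lemma pv_foldl_group (desc : String) (ks : List String) (p a : Nat) :
    (ks.map (fun k => (k, p))).foldl
      (fun best kp => if kp.2 < best ∧ PySem.Str.isIn kp.1 desc then kp.2 else best) a
    = if p < a ∧ ks.any (fun k => PySem.Str.isIn k desc) then p else a := by
  induction ks generalizing a with
  | nil => simp
  | cons k rest ih =>
    simp only [List.map_cons, List.foldl_cons, List.any_cons, Bool.or_eq_true]
    rw [ih]
    split_ifs <;> first | rfl | omega | tauto

lemma pv_table_split :
    pvKeywordPriority =
      (["process", "workflow", "steps", "decision", "if", "then"]).map (fun k => (k, 0)) ++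
      (["tree", "hierarchy", "parent", "child", "branch"]).map (fun k => (k, 1)) ++
      (["table", "grid", "rows", "columns", "matrix"]).map (fun k => (k, 2)) ++
      (["organization", "org chart", "levels", "manager", "team"]).map (fun k => (k, 3)) := rfl

-- ===== VERDICT (by name: the statement is the Claim_ definition above) =====
theorem detect_diagram_type_py_spec : Claim_equal_detect_diagram_type_py := by
  intro d _
  unfold Spec_detect_diagram_type_py detect_diagram_type_py detect_diagram_type_py_alt
  rw [pv_table_split]
  simp only [List.foldl_append, pv_foldl_group]
  set desc := PySem.Str.lower d
  cases h0 : (["process", "workflow", "steps", "decision", "if", "then"]).any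
      (fun k => PySem.Str.isIn k desc) <;>
  cases h1 : (["tree", "hierarchy", "parent", "child", "branch"]).any
      (fun k => PySem.Str.isIn k desc) <;>
  cases h2 : (["table", "grid", "rows", "columns", "matrix"]).any
      (fun k => PySem.Str.isIn k desc) <;>
  cases h3 : (["organization", "org chart", "levels", "manager", "team"]).any
      (fun k => PySem.Str.isIn k desc) <;>
    (try simp only [h0, h1, h2, h3]) <;> decide
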